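-- pv_equiv track=rewrite | github.com/cryft-labs/Cryft-0xVanity-Tool-Python | vanity_tool.py | is_valid_prefix_suffix
-- ===== SOURCE A (Python) =====
-- def is_valid_prefix_suffix(prefix, suffix):
--     valid_chars = set('0123456789abcdef')
--     if len(prefix) > 10 or len(suffix) > 10:
--         return False
--
--     for char in prefix + suffix:
--         if char.lower() not in valid_chars:
--             return False
--
--     return True
-- ===== SOURCE B (Python) =====
-- import re
--
-- _HEX = re.compile(r'[0-9a-fA-F]{0,10}')
--
-- def is_valid_prefix_suffix(prefix, suffix):
--     return bool(_HEX.fullmatch(prefix)) and bool(_HEX.fullmatch(suffix))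
-- ===== Notes on version B (the rewrite author's own statement) =====
-- stated objective: idiomatic
-- what changed: Replaced the explicit length test plus per-character loop over the concatenation prefix+suffix (lowercasing each char and testing set membership) with a single case-insensitive regex fullmatch r'[0-9a-fA-F]{0,10}' applied to each argument separately.
import Mathlib
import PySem

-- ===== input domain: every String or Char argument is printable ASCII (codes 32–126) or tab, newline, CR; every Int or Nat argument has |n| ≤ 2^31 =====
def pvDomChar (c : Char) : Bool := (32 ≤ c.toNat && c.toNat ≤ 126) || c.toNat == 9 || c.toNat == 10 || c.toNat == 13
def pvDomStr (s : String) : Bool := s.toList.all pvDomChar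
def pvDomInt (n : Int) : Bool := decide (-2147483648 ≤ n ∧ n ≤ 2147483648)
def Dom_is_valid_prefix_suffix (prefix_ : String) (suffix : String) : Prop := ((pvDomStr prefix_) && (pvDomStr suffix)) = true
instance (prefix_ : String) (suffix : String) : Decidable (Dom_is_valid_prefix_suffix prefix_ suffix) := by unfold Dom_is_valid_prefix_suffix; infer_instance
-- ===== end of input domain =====

-- B replaces A's explicit length check and per-character loop over prefix+suffix with a
-- regex fullmatch [0-9a-fA-F]{0,10} applied to each argument (idiomatic; same cost).


-- ===== PORT A =====
-- the for-loop with early 'return False'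
def pvLoopA (valid_chars : PySem.Set Char) : List Char → Bool
  | [] => true
  | c :: rest =>
      if (PySem.Set.contains valid_chars (PySem.Chars.lowerChar c)) = false then false
      else pvLoopA valid_chars rest

def is_valid_prefix_suffix (prefix_ : String) (suffix : String) : Bool :=
  let valid_chars : PySem.Set Char := PySem.Set.ofList "0123456789abcdef".toList
  if prefix_.toList.length > 10 ∨ suffix.toList.length > 10 then false
  else pvLoopA valid_chars (prefix_.toList ++ suffix.toList)

-- ===== PORT B =====
-- re.fullmatch(r'[0-9a-fA-F]{0,10}', s) ported as its meaning: length ≤ 10 and every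
-- char in the class [0-9a-fA-F]
def pvHexMatch (s : String) : Bool :=
  s.toList.length ≤ 10 && s.toList.all (fun c => ("0123456789abcdefABCDEF".toList).contains c)

def is_valid_prefix_suffix_alt (prefix_ : String) (suffix : String) : Bool :=
  pvHexMatch prefix_ && pvHexMatch suffix

-- ===== PRECONDITION & SPEC =====
def Spec_is_valid_prefix_suffix (prefix_ : String) (suffix : String) (out : Bool) : Prop := out = is_valid_prefix_suffix_alt prefix_ suffix
instance (prefix_ : String) (suffix : String) (out : Bool) : Decidable (Spec_is_valid_prefix_suffix prefix_ suffix out) := by unfold Spec_is_valid_prefix_suffix; infer_instance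

-- ===== CLAIM (what is proved, stated in full; the proofs are below) =====
def Claim_equal_is_valid_prefix_suffix : Prop := ∀ (prefix_ : String) (suffix : String), Dom_is_valid_prefix_suffix prefix_ suffix → Spec_is_valid_prefix_suffix prefix_ suffix (is_valid_prefix_suffix prefix_ suffix)

-- ===== LEMMAS AND PROOFS =====

-- the per-character fact, decided over all 128 ASCII code points
set_option maxRecDepth 4000 in
theorem pvCharKey_ofNat : ∀ n : Nat, n < 128 →
    (PySem.Set.contains (PySem.Set.ofList "0123456789abcdef".toList)
      (PySem.Chars.lowerChar (Char.ofNat n)))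
      = (("0123456789abcdefABCDEF".toList).contains (Char.ofNat n)) := by decide

theorem pvCharKey (c : Char) (h : pvDomChar c = true) :
    (PySem.Set.contains (PySem.Set.ofList "0123456789abcdef".toList)
      (PySem.Chars.lowerChar c))
      = (("0123456789abcdefABCDEF".toList).contains c) := by
  have hlt : c.toNat < 128 := by
    simp [pvDomChar] at h
    omega
  have := pvCharKey_ofNat c.toNat hlt
  simpa [Char.ofNat_toNat] using this

-- the early-return loop is 'all chars are in the class', on Dom chars
theorem pvLoopA_eq_all (cs : List Char) (h : cs.all pvDomChar = true) :
    pvLoopA (PySem.Set.ofList "0123456789abcdef".toList) cs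
      = cs.all (fun c => ("0123456789abcdefABCDEF".toList).contains c) := by
  induction cs with
  | nil => rfl
  | cons c rest ih =>
      simp only [List.all_cons, Bool.and_eq_true] at h
      rw [pvLoopA, pvCharKey c h.1, List.all_cons, ih h.2]
      cases hc : (("0123456789abcdefABCDEF".toList).contains c) <;> simp

-- ===== VERDICT (by name: the statement is the Claim_ definition above) =====
theorem is_valid_prefix_suffix_spec : Claim_equal_is_valid_prefix_suffix := by
  intro p s hdom
  unfold Spec_is_valid_prefix_suffix is_valid_prefix_suffix is_valid_prefix_suffix_alt
  simp only [Dom_is_valid_prefix_suffix, Bool.and_eq_true, pvDomStr] at hdom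
  by_cases hlen : p.toList.length > 10 ∨ s.toList.length > 10
  · rw [if_pos hlen]
    rcases hlen with h | h
    · have hp : pvHexMatch p = false := by
        unfold pvHexMatch
        rw [decide_eq_false (by omega)]
        simp
      rw [hp, Bool.false_and]
    · have hs : pvHexMatch s = false := by
        unfold pvHexMatch
        rw [decide_eq_false (by omega)]
        simp
      rw [hs, Bool.and_false]
  · rw [if_neg hlen]
    rw [not_or] at hlen
    have hall : (p.toList ++ s.toList).all pvDomChar = true := by
      rw [List.all_append, hdom.1, hdom.2, Bool.and_self]
    rw [pvLoopA_eq_all _ hall, List.all_append]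
    unfold pvHexMatch
    rw [decide_eq_true (by omega : p.toList.length ≤ 10),
        decide_eq_true (by omega : s.toList.length ≤ 10),
        Bool.true_and, Bool.true_and]
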